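-- pv_equiv track=rewrite | github.com/XJenso73/AdventOfCode | 2025/day06.py | _split_tasks
-- ===== SOURCE A (Python) =====
-- def _split_tasks(lines: list[str]) -> list[list[list[str]]]:
--     """Teilt das Grid in Aufgaben (rechts → links) anhand leerer Spalten."""
--     width = len(lines[0])
--     tasks = []
--     current = []
--
--     for c in range(width - 1, -1, -1):
--         col = _get_col(lines, c)
--         if all(ch == " " for ch in col):
--             if current:
--                 tasks.append(current)
--                 current = []
--         else:
--             current.append(col)
--
--     if current:
--         tasks.append(current)
--     return tasks
--
-- def _get_col(lines: list[str], c: int) -> list[str]: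
--     """Extrahiert eine Spalte aus dem Grid."""
--     return [lines[r][c] for r in range(len(lines))]
-- ===== SOURCE B (Python) =====
-- def _split_tasks(lines: list[str]) -> list[list[list[str]]]:
--     """Build the reversed column list first, then split it into maximal runs of
--     non-blank columns by index scanning (instead of a stateful accumulator loop)."""
--     cols = [[row[c] for row in lines] for c in range(len(lines[0]) - 1, -1, -1)]
--     tasks = []
--     i, n = 0, len(cols)
--     while i < n:
--         if _is_blank(cols[i]):
--             i += 1
--             continue
--         j = i
--         while j < n and not _is_blank(cols[j]):
--             j += 1
--         tasks.append(cols[i:j])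
--         i = j
--     return tasks
--
-- def _is_blank(col: list[str]) -> bool:
--     return all(ch == " " for ch in col)
-- ===== Notes on version B (the rewrite author's own statement) =====
-- stated objective: alternative
-- what changed: B materialises the reversed column list first and then partitions it into maximal runs of non-blank columns with an index scan (skip blanks / take a run), instead of interleaving column extraction with a stateful tasks/current accumulator loop.
import Mathlib
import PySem

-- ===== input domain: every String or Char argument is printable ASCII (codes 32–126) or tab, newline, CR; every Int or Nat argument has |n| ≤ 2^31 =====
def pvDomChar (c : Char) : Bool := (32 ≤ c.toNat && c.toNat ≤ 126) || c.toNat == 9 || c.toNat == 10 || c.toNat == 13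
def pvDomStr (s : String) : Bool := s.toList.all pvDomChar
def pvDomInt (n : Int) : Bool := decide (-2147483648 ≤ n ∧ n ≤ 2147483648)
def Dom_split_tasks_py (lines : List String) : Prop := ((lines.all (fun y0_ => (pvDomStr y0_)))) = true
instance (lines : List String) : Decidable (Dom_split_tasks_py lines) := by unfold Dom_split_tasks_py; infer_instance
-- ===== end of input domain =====

-- B rebuilds the column list first and then splits it into runs at blank columns; same cost, different decomposition (objective: alternative).

-- ===== PORT A =====
-- all(ch == " " for ch in col)  (used verbatim by both Pythons)
def pvIsBlank (col : List String) : Bool := col.all (fun ch => ch == " ")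

-- _get_col: [lines[r][c] for r in range(len(lines))]; the .getD defaults only
-- make the indexing total — Pre_ excludes the inputs where Python raises.
def pvGetColA (lines : List String) (c : Int) : List String :=
  (PySem.List.pyRange 0 (lines.length : Int) 1).map (fun r =>
    String.singleton ((PySem.Str.pyGet? (PySem.List.pyGetD lines r "") c).getD ' '))

def split_tasks_py (lines : List String) : List (List (List String)) :=
  let width : Int := (PySem.Str.len (PySem.List.pyGetD lines 0 "") : Int)
  let res := (PySem.List.pyRange (width - 1) (-1) (-1)).foldl
    (fun (st : List (List (List String)) × List (List String)) c =>
      let col := pvGetColA lines c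
      if pvIsBlank col then
        if st.2.isEmpty then st else (st.1 ++ [st.2], [])
      else (st.1, st.2 ++ [col]))
    ([], [])
  if res.2.isEmpty then res.1 else res.1 ++ [res.2]

-- ===== PORT B =====
-- cols = [[row[c] for row in lines] for c in range(len(lines[0]) - 1, -1, -1)]
def pvColsB (lines : List String) : List (List String) :=
  (PySem.List.pyRange ((PySem.Str.len (PySem.List.pyGetD lines 0 "") : Int) - 1) (-1) (-1)).map
    (fun c => lines.map (fun row => String.singleton ((PySem.Str.pyGet? row c).getD ' ')))

-- the index scan of Source B: skip a blank column, otherwise take the maximal non-blank run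
def pvPartition (cols : List (List String)) : List (List (List String)) :=
  match cols with
  | [] => []
  | c :: rest =>
    if pvIsBlank c then pvPartition rest
    else (c :: rest.takeWhile (fun x => !pvIsBlank x)) ::
          pvPartition (rest.dropWhile (fun x => !pvIsBlank x))
termination_by cols.length
decreasing_by
  · simp
  · have := List.length_dropWhile_le (fun x => !pvIsBlank x) rest
    simp; omega

def split_tasks_py_alt (lines : List String) : List (List (List String)) :=
  pvPartition (pvColsB lines)

-- ===== PRECONDITION & SPEC =====
-- Python A raises IndexError on lines = [] (len(lines[0])) and when some row is
-- shorter than the first row (lines[r][c]); Pre_ excludes exactly those inputs.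
def Pre_split_tasks_py (lines : List String) : Prop :=
  lines ≠ [] ∧ ∀ s ∈ lines, PySem.Str.len lines.headI ≤ PySem.Str.len s
instance (lines : List String) : Decidable (Pre_split_tasks_py lines) := by
  unfold Pre_split_tasks_py; infer_instance

def pvWitness_split_tasks_py : List String := ["ab c", "de f"]

def Spec_split_tasks_py (lines : List String) (out : List (List (List String))) : Prop := out = split_tasks_py_alt lines
instance (lines : List String) (out : List (List (List String))) : Decidable (Spec_split_tasks_py lines out) := by unfold Spec_split_tasks_py; infer_instance

-- ===== CLAIM (what is proved, stated in full; the proofs are below) =====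
def Claim_equal_split_tasks_py : Prop := ∀ (lines : List String), Dom_split_tasks_py lines → Pre_split_tasks_py lines → Spec_split_tasks_py lines (split_tasks_py lines)

-- ===== LEMMAS AND PROOFS =====

-- proof-side names for A's loop body and finalisation (definitionally A's port)
def pvStep (st : List (List (List String)) × List (List String)) (col : List String) :
    List (List (List String)) × List (List String) :=
  if pvIsBlank col then
    if st.2.isEmpty then st else (st.1 ++ [st.2], [])
  else (st.1, st.2 ++ [col])

def pvFin (st : List (List (List String)) × List (List String)) : List (List (List String)) :=
  if st.2.isEmpty then st.1 else st.1 ++ [st.2]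

theorem pvPartition_nil : pvPartition [] = [] := by
  rw [pvPartition]

theorem pvPartition_cons_blank (c : List String) (rest : List (List String))
    (h : pvIsBlank c = true) : pvPartition (c :: rest) = pvPartition rest := by
  conv_lhs => rw [pvPartition]
  simp [h]

theorem pvPartition_cons_nonblank (c : List String) (rest : List (List String))
    (h : pvIsBlank c = false) :
    pvPartition (c :: rest) =
      (c :: rest.takeWhile (fun x => !pvIsBlank x)) ::
        pvPartition (rest.dropWhile (fun x => !pvIsBlank x)) := by
  conv_lhs => rw [pvPartition]
  simp [h]

-- A column built by _get_col (index loop over rows) is B's per-row map over lines.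
theorem pvGetColA_eq (lines : List String) (c : Int) :
    pvGetColA lines c
      = lines.map (fun row => String.singleton ((PySem.Str.pyGet? row c).getD ' ')) := by
  unfold pvGetColA
  rw [show (fun r => String.singleton ((PySem.Str.pyGet? (PySem.List.pyGetD lines r "") c).getD ' '))
        = (fun row => String.singleton ((PySem.Str.pyGet? row c).getD ' '))
            ∘ (fun r => PySem.List.pyGetD lines r "") from rfl,
      ← List.map_map, PySem.List.map_pyGetD_pyRange_zero' lines ""]

-- A's accumulator loop over any column list equals B's index-scan partition
-- (with the pending run `cur` prepended to the first emitted task).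
theorem pvLoop_eq (cols : List (List String))
    (tasks : List (List (List String))) (cur : List (List String)) :
    pvFin (cols.foldl pvStep (tasks, cur))
      = tasks ++ (if cur.isEmpty then pvPartition cols
          else (cur ++ cols.takeWhile (fun x => !pvIsBlank x)) ::
                pvPartition (cols.dropWhile (fun x => !pvIsBlank x))) := by
  induction cols generalizing tasks cur with
  | nil =>
    by_cases hc : cur.isEmpty
    · simp [pvFin, hc, pvPartition_nil]
    · simp [pvFin, hc, pvPartition_nil]
  | cons c rest ih =>
    simp only [List.foldl_cons]
    by_cases hb : pvIsBlank c
    · have hstep : pvStep (tasks, cur) c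
          = if cur.isEmpty then (tasks, cur) else (tasks ++ [cur], []) := by
        simp [pvStep, hb]
      by_cases hc : cur.isEmpty
      · rw [hstep, if_pos hc, ih, if_pos hc, if_pos hc, pvPartition_cons_blank c rest hb]
      · rw [hstep, if_neg hc, ih, if_neg hc]
        simp [hb, pvPartition_cons_blank c rest hb]
    · have hb' : pvIsBlank c = false := by simpa using hb
      have hstep : pvStep (tasks, cur) c = (tasks, cur ++ [c]) := by
        simp [pvStep, hb']
      rw [hstep, ih]
      rw [if_neg (by simp)]
      by_cases hc : cur.isEmpty
      · have hcur : cur = [] := by simpa [List.isEmpty_iff] using hc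
        rw [if_pos hc, pvPartition_cons_nonblank c rest hb']
        simp [hcur]
      · rw [if_neg hc]
        simp [hb']

-- ===== VERDICT (by name: the statement is the Claim_ definition above) =====
theorem split_tasks_py_spec : Claim_equal_split_tasks_py := by
  intro lines _ _
  unfold Spec_split_tasks_py split_tasks_py_alt pvColsB
  have key : split_tasks_py lines
      = pvFin ((PySem.List.pyRange ((PySem.Str.len (PySem.List.pyGetD lines 0 "") : Int) - 1) (-1) (-1)).foldl
          (fun st c => pvStep st (pvGetColA lines c)) ([], [])) := rfl
  rw [key, ← List.foldl_map]
  rw [List.map_congr_left (fun c _ => pvGetColA_eq lines c)]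
  rw [pvLoop_eq]
  simp
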